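-- pv_equiv track=rewrite | github.com/CarlosAlvarezGomez/News-Portal | Classifiers/Propaganda Classifier/OpinionClassifier.py | split_with_labels
-- ===== SOURCE A (Python) =====
-- from typing import List, Tuple
--
-- def split_with_labels(labels : List[Tuple[int, int]], article : str) -> Tuple[List[str], List[int]]:
--   "split text into segments based upon labels"
--   if len(labels) == 0:
--     return [article], [0]
--   segments = []
--   binary_class = []
--   start = 0
--   for l_start, l_end in labels:
--     std_seg = article[start:l_start]
--     prop_seg = article[l_start:l_end]
--     segments.append(std_seg)
--     binary_class.append(0)
--     segments.append(prop_seg)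
--     binary_class.append(1)
--     start = l_end
--   last_seg = article[start:]
--   segments.append(last_seg)
--   binary_class.append(0)
--   return segments, binary_class
-- ===== SOURCE B (Python) =====
-- def split_with_labels(labels, article):
--   "split text into segments based upon labels (boundary-list sweep)"
--   boundaries = [0]
--   for l_start, l_end in labels:
--     boundaries.append(l_start)
--     boundaries.append(l_end)
--   boundaries.append(len(article))
--   segments = [article[x:y] for x, y in zip(boundaries, boundaries[1:])]
--   binary_class = [i % 2 for i in range(len(boundaries) - 1)]
--   return segments, binary_class
-- ===== Notes on version B (the rewrite author's own statement) =====
-- stated objective: simpler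
-- what changed: Replaces A's special-cased loop that appends two segments per label with a flat boundary list [0, l1s, l1e, ..., len(article)] swept once over adjacent pairs via zip, with classes i % 2; the empty-labels early return disappears.
import Mathlib
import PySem

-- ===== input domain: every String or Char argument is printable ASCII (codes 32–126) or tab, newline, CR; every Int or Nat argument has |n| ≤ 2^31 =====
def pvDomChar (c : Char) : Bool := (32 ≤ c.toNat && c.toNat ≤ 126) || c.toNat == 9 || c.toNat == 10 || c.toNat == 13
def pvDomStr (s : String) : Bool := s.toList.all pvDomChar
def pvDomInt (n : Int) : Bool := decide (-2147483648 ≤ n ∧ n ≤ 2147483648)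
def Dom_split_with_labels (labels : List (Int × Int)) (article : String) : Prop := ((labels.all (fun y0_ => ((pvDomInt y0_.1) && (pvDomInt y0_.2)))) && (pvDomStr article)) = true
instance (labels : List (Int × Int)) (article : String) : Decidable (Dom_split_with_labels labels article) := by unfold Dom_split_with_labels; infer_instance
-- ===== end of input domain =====

-- B replaces A's special-cased two-appends-per-label loop by a flat boundary list swept
-- once over adjacent pairs with parity classes (simpler; no early-return special case).

-- ===== PORT A =====
def split_with_labels (labels : List (Int × Int)) (article : String) : List String × List Int :=
  if labels.length = 0 then ([article], [0])
  else
    let st := labels.foldl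
      (fun (st : List String × List Int × Int) (p : Int × Int) =>
        let std_seg := PySem.Str.slice article (some st.2.2) (some p.1)
        let prop_seg := PySem.Str.slice article (some p.1) (some p.2)
        (st.1 ++ [std_seg] ++ [prop_seg], st.2.1 ++ [(0 : Int)] ++ [1], p.2))
      ([], [], 0)
    let last_seg := PySem.Str.slice article (some st.2.2) none
    (st.1 ++ [last_seg], st.2.1 ++ [0])

-- ===== PORT B =====
def split_with_labels_alt (labels : List (Int × Int)) (article : String) : List String × List Int :=
  let boundaries : List Int :=
    (labels.foldl (fun acc (p : Int × Int) => acc ++ [p.1] ++ [p.2]) [0]) ++ [PySem.Str.len article]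
  let segments :=
    (boundaries.zip (PySem.List.slice boundaries (some 1) none)).map
      (fun p => PySem.Str.slice article (some p.1) (some p.2))
  let binary_class := (List.range (boundaries.length - 1)).map (fun (i : Nat) => PySem.Int.mod (i : Int) 2)
  (segments, binary_class)

-- ===== PRECONDITION & SPEC =====
def Spec_split_with_labels (labels : List (Int × Int)) (article : String) (out : List String × List Int) : Prop := out = split_with_labels_alt labels article
instance (labels : List (Int × Int)) (article : String) (out : List String × List Int) : Decidable (Spec_split_with_labels labels article out) := by unfold Spec_split_with_labels; infer_instance

-- ===== CLAIM (what is proved, stated in full; the proofs are below) =====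
def Claim_equal_split_with_labels : Prop := ∀ (labels : List (Int × Int)) (article : String), Dom_split_with_labels labels article → Spec_split_with_labels labels article (split_with_labels labels article)

-- ===== LEMMAS AND PROOFS =====

-- the segments produced by A's loop body (without the trailing segment), as a recursion
def segsA (article : String) : Int → List (Int × Int) → List String
  | _, [] => []
  | s, p :: r =>
    PySem.Str.slice article (some s) (some p.1) ::
    PySem.Str.slice article (some p.1) (some p.2) :: segsA article p.2 r

-- the alternating 0,1,0,1,… class list of A's loop, one pair per label
def clsA : Nat → List Int
  | 0 => []
  | n + 1 => 0 :: 1 :: clsA n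

-- the value of `start` after A's loop
def lastS : Int → List (Int × Int) → Int
  | s, [] => s
  | _, p :: r => lastS p.2 r

theorem foldA_eq (article : String) (labels : List (Int × Int))
    (segs : List String) (bc : List Int) (s : Int) :
    labels.foldl
      (fun (st : List String × List Int × Int) (p : Int × Int) =>
        (st.1 ++ [PySem.Str.slice article (some st.2.2) (some p.1),
                  PySem.Str.slice article (some p.1) (some p.2)],
         st.2.1 ++ [(0 : Int), 1], p.2))
      (segs, bc, s)
    = (segs ++ segsA article s labels, bc ++ clsA labels.length, lastS s labels) := by
  induction labels generalizing segs bc s with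
  | nil => simp [segsA, clsA, lastS]
  | cons p r ih =>
    simp only [List.foldl_cons]
    rw [ih]
    simp [segsA, clsA, lastS]

theorem foldB_eq (labels : List (Int × Int)) (init : List Int) :
    labels.foldl (fun acc (p : Int × Int) => acc ++ [p.1] ++ [p.2]) init
    = init ++ labels.flatMap (fun p => [p.1, p.2]) := by
  induction labels generalizing init with
  | nil => simp
  | cons p r ih => simp [List.foldl_cons, List.flatMap_def]

-- a slice ending at len(article) is the same as an open-ended slice
theorem slice_to_len (s : String) (x : Int) :
    PySem.Str.slice s (some x) (some (PySem.Str.len s)) = PySem.Str.slice s (some x) none := by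
  apply String.toList_inj.mp
  have h : PySem.List.slice s.toList (some x) (some (s.toList.length : Int))
      = PySem.List.slice s.toList (some x) none := by
    simp [PySem.List.slice, PySem.List.clampIdx]
    split_ifs <;> omega
  simpa [PySem.Str.toList_slice, PySem.Str.len_eq] using h

theorem slice_all (s : String) :
    PySem.Str.slice s (some 0) none = s := by
  apply String.toList_inj.mp
  simp [PySem.Str.toList_slice]

-- sweeping adjacent boundary pairs reproduces A's loop segments plus the trailing one
theorem zip_map_eq (article : String) (labels : List (Int × Int)) (s L : Int) :
    ((s :: (labels.flatMap (fun p => [p.1, p.2]) ++ [L])).zip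
       ((labels.flatMap (fun p => [p.1, p.2]) ++ [L]))).map
      (fun p => PySem.Str.slice article (some p.1) (some p.2))
    = segsA article s labels ++ [PySem.Str.slice article (some (lastS s labels)) (some L)] := by
  induction labels generalizing s with
  | nil => simp [segsA, lastS]
  | cons p r ih =>
    simp only [List.flatMap_cons, List.cons_append, List.append_assoc,
      List.zip_cons_cons, List.map_cons, segsA, lastS]
    exact congrArg _ (congrArg _ (ih p.2))

theorem cls_eq_append (n : Nat) : clsA (n + 1) = clsA n ++ [0, 1] := by
  induction n with
  | zero => simp [clsA]
  | succ m ih =>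
    show 0 :: 1 :: clsA (m + 1) = (0 :: 1 :: clsA m) ++ [0, 1]
    rw [ih]; simp

-- range parity classes are the alternating list with a trailing 0
theorem range_mod_eq (n : Nat) :
    (List.range (2 * n + 1)).map (fun (i : Nat) => PySem.Int.mod (i : Int) 2) = clsA n ++ [0] := by
  induction n with
  | zero => simp [clsA]
  | succ m ih =>
    have h1 : 2 * (m + 1) + 1 = (2 * m + 1) + 1 + 1 := by omega
    rw [h1, List.range_succ, List.range_succ, List.map_append, List.map_append, ih]
    have e1 : PySem.Int.mod ((2 * m + 1 : Nat) : Int) 2 = 1 := by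
      rw [PySem.Int.mod_eq_emod_of_pos (by omega : (0 : Int) < 2)]; push_cast; omega
    have e2 : PySem.Int.mod ((2 * m + 1 + 1 : Nat) : Int) 2 = 0 := by
      rw [PySem.Int.mod_eq_emod_of_pos (by omega : (0 : Int) < 2)]; push_cast; omega
    simp only [List.map_cons, List.map_nil]
    rw [e1, e2, cls_eq_append]
    simp

theorem alt_eq (labels : List (Int × Int)) (article : String) :
    split_with_labels_alt labels article
    = (segsA article 0 labels ++ [PySem.Str.slice article (some (lastS 0 labels)) none],
       clsA labels.length ++ [0]) := by
  simp only [split_with_labels_alt]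
  rw [foldB_eq, PySem.List.slice_from_one]
  have hlen : ((([(0 : Int)] ++ labels.flatMap (fun p => [p.1, p.2])) ++ [PySem.Str.len article]).length - 1)
      = 2 * labels.length + 1 := by
    simp [List.length_flatMap]
    omega
  rw [hlen, range_mod_eq]
  simp only [List.cons_append, List.nil_append, List.tail_cons]
  rw [zip_map_eq, slice_to_len]

-- ===== VERDICT (by name: the statement is the Claim_ definition above) =====
theorem split_with_labels_spec : Claim_equal_split_with_labels := by
  intro labels article _
  unfold Spec_split_with_labels
  rw [alt_eq]
  cases labels with
  | nil => simp [split_with_labels, segsA, lastS, clsA, slice_all]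
  | cons p r =>
    have h : ¬ ((p :: r : List (Int × Int)).length = 0) := by simp
    simp only [split_with_labels, if_neg h, List.append_assoc, List.singleton_append]
    rw [foldA_eq]
    simp [clsA]
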